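-- pv_equiv track=rewrite | github.com/muhammadatt/wavely-app | server/scripts/spectral_subtraction.py | _expand_voiced_mask
-- ===== SOURCE A (Python) =====
-- def _expand_voiced_mask(voiced_mask, pre_roll, post_roll):
--     """Expand voiced regions to compensate for Silero label resolution (25 ms).
--
--     Silero labels switch state at 25 ms frame boundaries.  At a silence->voiced
--     transition the label can be up to one full Silero frame (~2 STFT frames)
--     late, causing the onset of a phrase to receive silence-mode suppression.
--
--     pre_roll  : STFT frames to mark as voiced *before* each voiced onset.
--     post_roll : STFT frames to mark as voiced *after* each voiced offset.
--
--     Both passes reference the original mask so expansions don't chain.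
--     """
--     n        = len(voiced_mask)
--     expanded = voiced_mask.copy()
--
--     # Post-roll: hold voiced state for post_roll frames after each voiced->silence edge
--     countdown = 0
--     for t in range(n):
--         if voiced_mask[t]:
--             countdown = post_roll
--         elif countdown > 0:
--             expanded[t] = True
--             countdown  -= 1
--
--     # Pre-roll: mark pre_roll frames before each silence->voiced edge as voiced
--     countdown = 0
--     for t in range(n - 1, -1, -1):
--         if voiced_mask[t]:
--             countdown = pre_roll
--         elif countdown > 0:
--             expanded[t] = True
--             countdown  -= 1
--
--     return expanded
-- ===== SOURCE B (Python) =====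
-- def _expand_voiced_mask(voiced_mask, pre_roll, post_roll):
--     # Prefix-sum formulation: frame i is voiced in the output exactly when some
--     # originally-voiced frame lies within post_roll frames before i or pre_roll
--     # frames after i (inclusive of i itself); tested via a running count of
--     # voiced frames, so each output frame is one prefix-count comparison.
--     n = len(voiced_mask)
--     pre = max(pre_roll, 0)
--     post = max(post_roll, 0)
--     pref = [0]
--     cur = 0
--     for v in voiced_mask:
--         cur += 1 if v else 0
--         pref.append(cur)
--     return [pref[min(i + pre + 1, n)] > pref[max(0, i - post)]
--             for i in range(n)]
-- ===== Notes on version B (the rewrite author's own statement) =====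
-- stated objective: alternative
-- what changed: Replaces A's two stateful countdown sweeps (forward post-roll, backward pre-roll, both mutating a copy in place) by a running prefix count of voiced frames plus one comprehension that marks frame i voiced iff the count of originally-voiced frames in the clamped window [i-post_roll, i+pre_roll] is positive.
import Mathlib
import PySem

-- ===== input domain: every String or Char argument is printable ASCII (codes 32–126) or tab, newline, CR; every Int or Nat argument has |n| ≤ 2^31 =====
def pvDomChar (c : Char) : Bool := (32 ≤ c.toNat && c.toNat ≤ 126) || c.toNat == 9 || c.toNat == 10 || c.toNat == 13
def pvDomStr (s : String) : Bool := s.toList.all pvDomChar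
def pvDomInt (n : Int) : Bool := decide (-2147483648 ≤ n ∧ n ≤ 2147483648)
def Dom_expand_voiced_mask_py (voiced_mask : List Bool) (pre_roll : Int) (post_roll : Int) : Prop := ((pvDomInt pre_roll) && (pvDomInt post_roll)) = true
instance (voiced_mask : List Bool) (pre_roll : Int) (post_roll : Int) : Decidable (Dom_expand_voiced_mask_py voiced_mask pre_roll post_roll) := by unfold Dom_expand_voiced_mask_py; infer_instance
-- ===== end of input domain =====

-- B replaces A's two stateful countdown sweeps by a prefix-sum of the voiced counts:
-- frame i is output-voiced iff the count of voiced frames in the window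
-- [i - post_roll, i + pre_roll] is positive (objective: alternative; not claimed faster).

-- ===== PORT A =====
-- One countdown sweep of A. Each loop of A reads voiced_mask[t], keeps a countdown, and
-- writes expanded[t] (only ever setting True); since each index is written once from
-- (voiced_mask[t], current expanded[t], countdown), the in-place loop is rendered as a
-- stateful map over the zipped pairs (voiced_mask[t], expanded[t]); the second
-- (descending-range) loop is the same pass over the reversed lists, reversed back.
def pvPassA (roll : Int) : Int → List (Bool × Bool) → List Bool
  | _, [] => []
  | cd, (v, e) :: rest =>
    if v then e :: pvPassA roll roll rest
    else if cd > 0 then true :: pvPassA roll (cd - 1) rest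
    else e :: pvPassA roll cd rest

def expand_voiced_mask_py (voiced_mask : List Bool) (pre_roll : Int) (post_roll : Int) : List Bool :=
  -- expanded = voiced_mask.copy(); forward post-roll loop:
  let e1 := pvPassA post_roll 0 (voiced_mask.zip voiced_mask)
  -- backward pre-roll loop over range(n-1, -1, -1):
  (pvPassA pre_roll 0 (voiced_mask.reverse.zip e1.reverse)).reverse

-- ===== PORT B =====
def expand_voiced_mask_py_alt (voiced_mask : List Bool) (pre_roll : Int) (post_roll : Int) : List Bool :=
  let n := voiced_mask.length
  let pre := max pre_roll 0
  let post := max post_roll 0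
  -- running prefix counts of voiced frames (pref[k] = # voiced among the first k frames)
  let pref := (voiced_mask.foldl
    (fun (acc : List Nat × Nat) v =>
      let cur := acc.2 + (if v then 1 else 0)
      (acc.1 ++ [cur], cur)) ([0], 0)).1
  (List.range n).map (fun (i : Nat) =>
    decide (pref.getD (min ((i : Int) + pre + 1) (n : Int)).toNat 0
      > pref.getD (max 0 ((i : Int) - post)).toNat 0))

-- ===== PRECONDITION & SPEC =====
def Spec_expand_voiced_mask_py (voiced_mask : List Bool) (pre_roll : Int) (post_roll : Int) (out : List Bool) : Prop := out = expand_voiced_mask_py_alt voiced_mask pre_roll post_roll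
instance (voiced_mask : List Bool) (pre_roll : Int) (post_roll : Int) (out : List Bool) : Decidable (Spec_expand_voiced_mask_py voiced_mask pre_roll post_roll out) := by unfold Spec_expand_voiced_mask_py; infer_instance

-- ===== CLAIM (what is proved, stated in full; the proofs are below) =====
def Claim_equal_expand_voiced_mask_py : Prop := ∀ (voiced_mask : List Bool) (pre_roll : Int) (post_roll : Int), Dom_expand_voiced_mask_py voiced_mask pre_roll post_roll → Spec_expand_voiced_mask_py voiced_mask pre_roll post_roll (expand_voiced_mask_py voiced_mask pre_roll post_roll)

-- ===== LEMMAS AND PROOFS =====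

theorem pvPassA_length (roll : Int) (cd : Int) (ps : List (Bool × Bool)) :
    (pvPassA roll cd ps).length = ps.length := by
  induction ps generalizing cd with
  | nil => rfl
  | cons p rest ih =>
    obtain ⟨v, e⟩ := p
    simp only [pvPassA]
    split_ifs <;> simp [ih]

theorem pvShiftE (v e : Bool) (rest : List (Bool × Bool)) (i : Nat) (roll : Int) :
    (∃ j, j < i + 1 ∧ ((((v, e) :: rest).getD j (false, false)).1 = true) ∧
        ((i : Int) + 1) - (j : Int) ≤ roll) ↔
    ((v = true ∧ (i : Int) + 1 ≤ roll) ∨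
      ∃ j, j < i ∧ ((rest.getD j (false, false)).1 = true) ∧ (i : Int) - (j : Int) ≤ roll) := by
  constructor
  · rintro ⟨j, hj, hvj, hle⟩
    cases j with
    | zero => exact Or.inl ⟨by simpa using hvj, by push_cast at hle; omega⟩
    | succ k =>
      refine Or.inr ⟨k, by omega, by simpa using hvj, ?_⟩
      push_cast at hle; omega
  · rintro (⟨hv, hle⟩ | ⟨j, hj, hvj, hle⟩)
    · exact ⟨0, by omega, by simpa using hv, by push_cast; omega⟩
    · exact ⟨j + 1, by omega, by simpa using hvj, by push_cast; omega⟩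

theorem pvShiftN (v : Bool) {e : Bool} (rest : List (Bool × Bool)) (i : Nat) :
    (∀ j, j < i + 1 → (((v, e) :: rest).getD j (false, false)).1 = false) ↔
    (v = false ∧ ∀ j, j < i → (rest.getD j (false, false)).1 = false) := by
  constructor
  · intro hN
    refine ⟨by simpa using hN 0 (by omega), fun j hj => by simpa using hN (j + 1) (by omega)⟩
  · rintro ⟨hv, hN⟩ j hj
    cases j with
    | zero => simpa using hv
    | succ k => simpa using hN k (by omega)

-- characterization of one countdown sweep
theorem pvPassA_char (roll : Int) (ps : List (Bool × Bool)) (cd : Int) (i : Nat)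
    (h : i < ps.length) :
    ((pvPassA roll cd ps).getD i false = true ↔
      (ps.getD i (false, false)).2 = true ∨
      ((ps.getD i (false, false)).1 = false ∧
        ((∃ j, j < i ∧ (ps.getD j (false, false)).1 = true ∧ (i : Int) - (j : Int) ≤ roll) ∨
         ((i : Int) < cd ∧ ∀ j, j < i → (ps.getD j (false, false)).1 = false)))) := by
  induction ps generalizing cd i with
  | nil => simp at h
  | cons p rest ih =>
    obtain ⟨v, e⟩ := p
    cases i with
    | zero =>
      cases v with
      | true => simp [pvPassA]
      | false =>
        by_cases hcd : cd > 0 <;> simp [pvPassA, hcd]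
    | succ i =>
      have h' : i < rest.length := by simpa using Nat.lt_of_succ_lt_succ h
      cases v with
      | true =>
        have : pvPassA roll cd ((true, e) :: rest) = e :: pvPassA roll roll rest := by
          simp [pvPassA]
        rw [this, List.getD_cons_succ, ih roll i h']
        push_cast
        simp only [List.getD_cons_succ, pvShiftE, pvShiftN]
        constructor
        · rintro (hA | ⟨hB, (⟨j, hj, hvj, hle⟩ | ⟨hlt, hN⟩)⟩)
          · exact Or.inl hA
          · exact Or.inr ⟨hB, Or.inl (Or.inr ⟨j, hj, hvj, by omega⟩)⟩
          · exact Or.inr ⟨hB, Or.inl (Or.inl ⟨trivial, by omega⟩)⟩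
        · rintro (hA | ⟨hB, (⟨⟨_, hle⟩ | ⟨j, hj, hvj, hle⟩⟩ | ⟨_, hvf, _⟩)⟩)
          · exact Or.inl hA
          · by_cases hN : ∀ j, j < i → (rest.getD j (false, false)).1 = false
            · exact Or.inr ⟨hB, Or.inr ⟨by omega, hN⟩⟩
            · rw [not_forall] at hN
              obtain ⟨k, hN⟩ := hN
              rw [Classical.not_imp, Bool.not_eq_false] at hN
              obtain ⟨hk, hvk⟩ := hN
              exact Or.inr ⟨hB, Or.inl ⟨k, hk, hvk, by omega⟩⟩
          · exact Or.inr ⟨hB, Or.inl ⟨j, hj, hvj, by omega⟩⟩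
          · simp at hvf
      | false =>
        by_cases hcd : cd > 0
        · have : pvPassA roll cd ((false, e) :: rest) = true :: pvPassA roll (cd - 1) rest := by
            simp [pvPassA, hcd]
          rw [this, List.getD_cons_succ, ih (cd - 1) i h']
          push_cast
          simp only [List.getD_cons_succ, pvShiftE, pvShiftN]
          constructor
          · rintro (hA | ⟨hB, (⟨j, hj, hvj, hle⟩ | ⟨hlt, hN⟩)⟩)
            · exact Or.inl hA
            · exact Or.inr ⟨hB, Or.inl (Or.inr ⟨j, hj, hvj, by omega⟩)⟩
            · exact Or.inr ⟨hB, Or.inr ⟨by omega, trivial, hN⟩⟩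
          · rintro (hA | ⟨hB, (⟨⟨hvt, _⟩ | ⟨j, hj, hvj, hle⟩⟩ | ⟨hlt, _, hN⟩)⟩)
            · exact Or.inl hA
            · simp at hvt
            · exact Or.inr ⟨hB, Or.inl ⟨j, hj, hvj, by omega⟩⟩
            · exact Or.inr ⟨hB, Or.inr ⟨by omega, hN⟩⟩
        · have : pvPassA roll cd ((false, e) :: rest) = e :: pvPassA roll cd rest := by
            simp [pvPassA, hcd]
          rw [this, List.getD_cons_succ, ih cd i h']
          push_cast
          simp only [List.getD_cons_succ, pvShiftE, pvShiftN]
          constructor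
          · rintro (hA | ⟨hB, (⟨j, hj, hvj, hle⟩ | ⟨hlt, hN⟩)⟩)
            · exact Or.inl hA
            · exact Or.inr ⟨hB, Or.inl (Or.inr ⟨j, hj, hvj, by omega⟩)⟩
            · omega
          · rintro (hA | ⟨hB, (⟨⟨hvt, _⟩ | ⟨j, hj, hvj, hle⟩⟩ | ⟨hlt, _⟩)⟩)
            · exact Or.inl hA
            · simp at hvt
            · exact Or.inr ⟨hB, Or.inl ⟨j, hj, hvj, by omega⟩⟩
            · omega

theorem expand_voiced_mask_py_length (voiced_mask : List Bool) (pre_roll post_roll : Int) :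
    (expand_voiced_mask_py voiced_mask pre_roll post_roll).length = voiced_mask.length := by
  simp [expand_voiced_mask_py, pvPassA_length, List.length_zip, pvPassA_length]

theorem pv_getD_reverse {α : Type} (l : List α) (i : Nat) (d : α) (h : i < l.length) :
    l.reverse.getD i d = l.getD (l.length - 1 - i) d := by
  rw [List.getD_eq_getElem _ _ (by simpa using h), List.getD_eq_getElem _ _ (by omega),
    List.getElem_reverse]

theorem pv_getD_zip (xs ys : List Bool) (j : Nat) (h1 : j < xs.length) (h2 : j < ys.length) :
    (xs.zip ys).getD j (false, false) = (xs.getD j false, ys.getD j false) := by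
  rw [List.getD_eq_getElem _ _ (by simp; omega), List.getElem_zip,
    List.getD_eq_getElem _ _ h1, List.getD_eq_getElem _ _ h2]

theorem pv_any_drop_take (xs : List Bool) (a c : Nat) :
    ((xs.drop a).take c).any id = true ↔
      ∃ j, j < xs.length ∧ a ≤ j ∧ j < a + c ∧ xs.getD j false = true := by
  rw [List.any_eq_true]
  constructor
  · rintro ⟨x, hx, hid⟩
    rw [List.mem_iff_getElem] at hx
    obtain ⟨k, hk, hxk⟩ := hx
    have hk' : a + k < xs.length ∧ k < c := by
      simp only [List.length_take, List.length_drop] at hk; omega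
    refine ⟨a + k, hk'.1, by omega, by omega, ?_⟩
    rw [List.getD_eq_getElem _ _ hk'.1]
    have : ((xs.drop a).take c)[k] = xs[a + k] := by
      simp [List.getElem_take, List.getElem_drop]
    simp only [id_eq] at hid
    rw [← this, hxk, hid]
  · rintro ⟨j, hj, haj, hjc, hx⟩
    refine ⟨true, ?_, rfl⟩
    rw [List.mem_iff_getElem]
    refine ⟨j - a, by simp only [List.length_take, List.length_drop]; omega, ?_⟩
    have h1 : ((xs.drop a).take c)[j - a]'(by simp only [List.length_take, List.length_drop]; omega)
        = xs[a + (j - a)]'(by omega) := by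
      simp [List.getElem_take, List.getElem_drop]
    rw [h1]
    have h2 : a + (j - a) = j := by omega
    rw [List.getD_eq_getElem _ _ hj] at hx
    simp only [h2]
    exact hx

-- pointwise characterization of A
theorem A_char (voiced_mask : List Bool) (pre_roll post_roll : Int) (i : Nat)
    (h : i < voiced_mask.length) :
    ((expand_voiced_mask_py voiced_mask pre_roll post_roll).getD i false = true ↔
      ∃ j, j < voiced_mask.length ∧ voiced_mask.getD j false = true ∧
        (i : Int) - (j : Int) ≤ max post_roll 0 ∧ (j : Int) - (i : Int) ≤ max pre_roll 0) := by
  have hzlen : (voiced_mask.zip voiced_mask).length = voiced_mask.length := by simp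
  have he1len : (pvPassA post_roll 0 (voiced_mask.zip voiced_mask)).length = voiced_mask.length := by
    rw [pvPassA_length, hzlen]
  have hzz : ∀ j, j < voiced_mask.length →
      (voiced_mask.zip voiced_mask).getD j (false, false)
        = (voiced_mask.getD j false, voiced_mask.getD j false) := by
    intro j hj; exact pv_getD_zip _ _ j hj hj
  -- characterization of the forward (post-roll) sweep
  have hch1 : ∀ k, k < voiced_mask.length →
      ((pvPassA post_roll 0 (voiced_mask.zip voiced_mask)).getD k false = true ↔
        voiced_mask.getD k false = true ∨
        (voiced_mask.getD k false = false ∧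
          ∃ j, j < k ∧ voiced_mask.getD j false = true ∧ (k : Int) - (j : Int) ≤ post_roll)) := by
    intro k hk
    rw [pvPassA_char post_roll _ 0 k (by omega)]
    rw [hzz k hk]
    constructor
    · rintro (h2 | ⟨h1, (⟨j, hj, hvj, hle⟩ | ⟨hneg, _⟩)⟩)
      · exact Or.inl h2
      · refine Or.inr ⟨h1, j, hj, ?_, hle⟩
        rw [hzz j (by omega)] at hvj
        simpa using hvj
      · omega
    · rintro (h2 | ⟨h1, j, hj, hvj, hle⟩)
      · exact Or.inl h2
      · refine Or.inr ⟨h1, Or.inl ⟨j, hj, ?_, hle⟩⟩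
        rw [hzz j (by omega)]; simpa using hvj
  set e1 := pvPassA post_roll 0 (voiced_mask.zip voiced_mask) with he1
  have hzrlen : (voiced_mask.reverse.zip e1.reverse).length = voiced_mask.length := by
    simp [he1len]
  have hzr : ∀ j, j < voiced_mask.length →
      (voiced_mask.reverse.zip e1.reverse).getD j (false, false)
        = (voiced_mask.getD (voiced_mask.length - 1 - j) false,
           e1.getD (voiced_mask.length - 1 - j) false) := by
    intro j hj
    rw [pv_getD_zip _ _ j (by simpa using hj) (by rw [List.length_reverse, he1len]; omega),
      pv_getD_reverse _ _ _ (by omega), pv_getD_reverse _ _ _ (by rw [he1len]; omega), he1len]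
  have hplen : (pvPassA pre_roll 0 (voiced_mask.reverse.zip e1.reverse)).length
      = voiced_mask.length := by rw [pvPassA_length, hzrlen]
  have hrev0 : expand_voiced_mask_py voiced_mask pre_roll post_roll
      = (pvPassA pre_roll 0 (voiced_mask.reverse.zip e1.reverse)).reverse := rfl
  rw [hrev0, pv_getD_reverse _ _ _ (by omega), hplen,
    pvPassA_char pre_roll _ 0 (voiced_mask.length - 1 - i) (by omega),
    hzr (voiced_mask.length - 1 - i) (by omega)]
  have hii : voiced_mask.length - 1 - (voiced_mask.length - 1 - i) = i := by omega
  rw [hii]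
  dsimp only
  constructor
  · rintro (he | ⟨hvi, (⟨j', hj', hvj', hle⟩ | ⟨hneg, _⟩)⟩)
    · rcases (hch1 i h).mp he with hv | ⟨_, j, hj, hvj, hle⟩
      · exact ⟨i, h, hv, by omega, by omega⟩
      · exact ⟨j, by omega, hvj, by omega, by omega⟩
    · rw [hzr j' (by omega)] at hvj'
      have hv' : voiced_mask.getD (voiced_mask.length - 1 - j') false = true := by
        simpa using hvj'
      exact ⟨voiced_mask.length - 1 - j', by omega, hv', by omega, by omega⟩
    · omega
  · rintro ⟨j, hj, hvj, hpost, hpre⟩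
    rcases Nat.lt_trichotomy j i with hji | hji | hji
    · -- j < i : the forward sweep marked i (or i itself is voiced)
      by_cases hvi : voiced_mask.getD i false = true
      · exact Or.inl ((hch1 i h).mpr (Or.inl hvi))
      · rw [Bool.not_eq_true] at hvi
        exact Or.inl ((hch1 i h).mpr (Or.inr ⟨hvi, j, hji, hvj, by omega⟩))
    · exact Or.inl ((hch1 i h).mpr (Or.inl (hji ▸ hvj)))
    · -- i < j : the backward sweep marked i (or i itself is voiced)
      by_cases hvi : voiced_mask.getD i false = true
      · exact Or.inl ((hch1 i h).mpr (Or.inl hvi))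
      · rw [Bool.not_eq_true] at hvi
        refine Or.inr ⟨hvi, Or.inl ⟨voiced_mask.length - 1 - j, by omega, ?_, by omega⟩⟩
        rw [hzr (voiced_mask.length - 1 - j) (by omega)]
        have : voiced_mask.length - 1 - (voiced_mask.length - 1 - j) = j := by omega
        rw [this]
        exact hvj

-- pointwise characterization of B
theorem B_char (voiced_mask : List Bool) (pre_roll post_roll : Int) (i : Nat)
    (h : i < voiced_mask.length) :
    ((expand_voiced_mask_py_alt voiced_mask pre_roll post_roll).getD i false = true ↔
      ∃ j, j < voiced_mask.length ∧ voiced_mask.getD j false = true ∧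
        (i : Int) - (j : Int) ≤ max post_roll 0 ∧ (j : Int) - (i : Int) ≤ max pre_roll 0) := by
  have hfold : ∀ (xs : List Bool) (pref0 : List Nat) (cur : Nat),
      (xs.foldl (fun (acc : List Nat × Nat) v =>
          (acc.1 ++ [acc.2 + (if v then 1 else 0)], acc.2 + (if v then 1 else 0))) (pref0, cur)).1
        = pref0 ++ (List.range xs.length).map
            (fun k => cur + (xs.take (k + 1)).countP id) := by
    intro xs
    induction xs with
    | nil => intro pref0 cur; simp
    | cons v rest ih =>
      intro pref0 cur
      rw [List.foldl_cons, ih, List.append_assoc]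
      congr 1
      rw [List.length_cons, List.range_succ_eq_map, List.map_cons, List.map_map,
        List.singleton_append]
      congr 1
      · cases v <;> simp
      · apply List.map_congr_left
        intro k _
        simp only [Function.comp_apply, Nat.succ_eq_add_one, List.take_succ_cons,
          List.countP_cons, id_eq]
        cases v <;> simp <;> omega
  have hpref : ∀ k, k ≤ voiced_mask.length →
      ((voiced_mask.foldl
        (fun (acc : List Nat × Nat) v =>
          (acc.1 ++ [acc.2 + (if v then 1 else 0)], acc.2 + (if v then 1 else 0))) ([0], 0)).1).getD k 0
        = (voiced_mask.take k).countP id := by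
    intro k hk
    rw [hfold]
    cases k with
    | zero => simp
    | succ j =>
      have hj : j < voiced_mask.length := by omega
      rw [show ([0] ++ (List.range voiced_mask.length).map
            (fun k => 0 + (voiced_mask.take (k + 1)).countP id))
          = 0 :: (List.range voiced_mask.length).map
            (fun k => 0 + (voiced_mask.take (k + 1)).countP id) from rfl,
        List.getD_cons_succ, List.getD_eq_getElem _ _ (by simpa using hj),
        List.getElem_map, List.getElem_range]
      omega
  have hmap : (expand_voiced_mask_py_alt voiced_mask pre_roll post_roll).getD i false
      = decide (((voiced_mask.take (min ((i : Int) + max pre_roll 0 + 1)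
            ((voiced_mask.length : Int))).toNat).countP id)
          > ((voiced_mask.take (max 0 ((i : Int) - max post_roll 0)).toNat).countP id)) := by
    rw [List.getD_eq_getElem _ _ (by simpa [expand_voiced_mask_py_alt] using h)]
    simp only [expand_voiced_mask_py_alt, List.getElem_map, List.getElem_range]
    rw [hpref _ (by omega), hpref _ (by omega)]
  rw [hmap]
  rw [decide_eq_true_iff]
  rw [show (min ((i : Int) + max pre_roll 0 + 1) ((voiced_mask.length : Int))).toNat
      = (max 0 ((i : Int) - max post_roll 0)).toNat
        + ((min ((i : Int) + max pre_roll 0 + 1) ((voiced_mask.length : Int))).toNat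
            - (max 0 ((i : Int) - max post_roll 0)).toNat) from by omega,
    List.take_add, List.countP_append]
  constructor
  · intro hgt
    have hpos : 0 < ((voiced_mask.drop (max 0 ((i : Int) - max post_roll 0)).toNat).take
        ((min ((i : Int) + max pre_roll 0 + 1) ((voiced_mask.length : Int))).toNat
          - (max 0 ((i : Int) - max post_roll 0)).toNat)).countP id := by omega
    rw [List.countP_pos_iff] at hpos
    obtain ⟨x, hx, hxt⟩ := hpos
    have hany : ((voiced_mask.drop (max 0 ((i : Int) - max post_roll 0)).toNat).take
        ((min ((i : Int) + max pre_roll 0 + 1) ((voiced_mask.length : Int))).toNat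
          - (max 0 ((i : Int) - max post_roll 0)).toNat)).any id = true :=
      List.any_eq_true.mpr ⟨x, hx, hxt⟩
    rw [pv_any_drop_take] at hany
    obtain ⟨j, hj, haj, hjc, hxj⟩ := hany
    exact ⟨j, hj, hxj, by omega, by omega⟩
  · rintro ⟨j, hj, hx, hpost, hpre⟩
    have hany : ((voiced_mask.drop (max 0 ((i : Int) - max post_roll 0)).toNat).take
        ((min ((i : Int) + max pre_roll 0 + 1) ((voiced_mask.length : Int))).toNat
          - (max 0 ((i : Int) - max post_roll 0)).toNat)).any id = true := by
      rw [pv_any_drop_take]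
      exact ⟨j, hj, by omega, by omega, hx⟩
    rw [List.any_eq_true] at hany
    obtain ⟨x, hx', hxt⟩ := hany
    have := List.countP_pos_iff (p := id)
      (l := (voiced_mask.drop (max 0 ((i : Int) - max post_roll 0)).toNat).take
        ((min ((i : Int) + max pre_roll 0 + 1) ((voiced_mask.length : Int))).toNat
          - (max 0 ((i : Int) - max post_roll 0)).toNat))
    have hpos := this.mpr ⟨x, hx', hxt⟩
    omega

-- ===== VERDICT (by name: the statement is the Claim_ definition above) =====
theorem expand_voiced_mask_py_spec : Claim_equal_expand_voiced_mask_py := by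
  intro voiced_mask pre_roll post_roll _
  unfold Spec_expand_voiced_mask_py
  have hlenA := expand_voiced_mask_py_length voiced_mask pre_roll post_roll
  have hlenB : (expand_voiced_mask_py_alt voiced_mask pre_roll post_roll).length = voiced_mask.length := by
    simp [expand_voiced_mask_py_alt]
  apply List.ext_getElem (by omega)
  intro i h1 h2
  have hi : i < voiced_mask.length := by omega
  have hA := A_char voiced_mask pre_roll post_roll i hi
  have hB := B_char voiced_mask pre_roll post_roll i hi
  rw [List.getD_eq_getElem _ _ h1] at hA
  rw [List.getD_eq_getElem _ _ h2] at hB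
  exact Bool.eq_iff_iff.mpr (hA.trans hB.symm)
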